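-- pv_equiv track=rewrite | github.com/henriquef9/Python-Campo_Minado | Campo Minado/campominado3.0.py | gerar_Matriz_Coord
-- ===== SOURCE A (Python) =====
-- def gerar_Matriz_Coord(tamanho):
--     pos_quadrado_x = 0
--     pos_quadrado_y = 80
--     matriz = []
--     for i in range(tamanho):
--         linha = []
--         for j in range(tamanho):
--             cord =[]
--             for f in range(tamanho):
--                 cord = []
--                 cord.append(pos_quadrado_x)
--                 cord.append(pos_quadrado_y)
--             pos_quadrado_x+=20
--             linha.append(cord)
--         matriz.append(linha)
--         pos_quadrado_x =0
--         pos_quadrado_y+=20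
--     return matriz
-- ===== SOURCE B (Python) =====
-- def gerar_Matriz_Coord(tamanho):
--     return [[[20 * j, 80 + 20 * i] for j in range(tamanho)]
--             for i in range(tamanho)]
-- ===== Notes on version B (the rewrite author's own statement) =====
-- stated objective: simpler
-- what changed: Replaced the three nested loops with mutable running-position accumulators (and a redundant innermost loop that rebuilds the same pair tamanho times) by a nested comprehension computing each cell in closed form from its indices (x = 20*j, y = 80 + 20*i).
import Mathlib
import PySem

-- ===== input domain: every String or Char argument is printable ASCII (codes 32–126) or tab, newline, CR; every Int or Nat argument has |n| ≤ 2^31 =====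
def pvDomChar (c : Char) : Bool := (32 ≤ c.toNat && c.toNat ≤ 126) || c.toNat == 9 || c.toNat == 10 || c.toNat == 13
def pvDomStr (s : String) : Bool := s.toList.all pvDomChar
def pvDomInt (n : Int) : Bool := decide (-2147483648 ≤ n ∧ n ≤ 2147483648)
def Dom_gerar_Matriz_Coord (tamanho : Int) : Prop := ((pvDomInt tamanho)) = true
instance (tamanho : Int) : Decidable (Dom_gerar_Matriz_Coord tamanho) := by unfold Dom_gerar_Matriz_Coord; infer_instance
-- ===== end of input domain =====

-- B replaces A's mutable running-position accumulators (and the redundant innermost loop)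
-- by a closed-form nested comprehension: x = 20*j, y = 80 + 20*i.

-- ===== PORT A =====
-- the innermost 'for f in range(tamanho)' loop: rebuilds cord = [px, py] each pass
def pvInnermost (r : List Int) (px py : Int) : List Int :=
  r.foldl (fun _ _ => [px, py]) []

-- body of 'for j in range(tamanho)': state = (pos_quadrado_x, linha)
def pvInnerStep (r : List Int) (py : Int) (st : Int × List (List Int)) (_j : Int) :
    Int × List (List Int) :=
  (st.1 + 20, st.2 ++ [pvInnermost r st.1 py])

-- body of 'for i in range(tamanho)': state = (pos_quadrado_x, pos_quadrado_y, matriz)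
def pvOuterStep (r : List Int) (st : Int × Int × List (List (List Int))) (_i : Int) :
    Int × Int × List (List (List Int)) :=
  let inner := r.foldl (pvInnerStep r st.2.1) (st.1, [])
  (0, st.2.1 + 20, st.2.2 ++ [inner.2])

def gerar_Matriz_Coord (tamanho : Int) : List (List (List Int)) :=
  let r := PySem.List.pyRange 0 tamanho 1
  (r.foldl (pvOuterStep r) (0, 80, [])).2.2

-- ===== PORT B =====
def gerar_Matriz_Coord_alt (tamanho : Int) : List (List (List Int)) :=
  (PySem.List.pyRange 0 tamanho 1).map (fun i =>
    (PySem.List.pyRange 0 tamanho 1).map (fun j => [20 * j, 80 + 20 * i]))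

-- ===== PRECONDITION & SPEC =====
def Spec_gerar_Matriz_Coord (tamanho : Int) (out : List (List (List Int))) : Prop := out = gerar_Matriz_Coord_alt tamanho
instance (tamanho : Int) (out : List (List (List Int))) : Decidable (Spec_gerar_Matriz_Coord tamanho out) := by unfold Spec_gerar_Matriz_Coord; infer_instance

-- ===== CLAIM (what is proved, stated in full; the proofs are below) =====
def Claim_equal_gerar_Matriz_Coord : Prop := ∀ (tamanho : Int), Dom_gerar_Matriz_Coord tamanho → Spec_gerar_Matriz_Coord tamanho (gerar_Matriz_Coord tamanho)

-- ===== LEMMAS AND PROOFS =====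

theorem pvInnermost_eq (r : List Int) (px py : Int) :
    pvInnermost r px py = if r = [] then [] else [px, py] := by
  cases r with
  | nil => rfl
  | cons x t =>
    simp only [pvInnermost, List.foldl_cons, if_neg (List.cons_ne_nil x t)]
    induction t generalizing x with
    | nil => rfl
    | cons y t ih => simpa [List.foldl_cons] using ih y

theorem pvInner_fold (r : List Int) (py : Int) :
    ∀ (l : List Int) (px : Int) (linha : List (List Int)),
      l.foldl (pvInnerStep r py) (px, linha) =
        (px + 20 * l.length,
         linha ++ (List.range l.length).map
           (fun (j : Nat) => pvInnermost r (px + 20 * (j : Int)) py)) := by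
  intro l
  induction l with
  | nil => intro px linha; simp
  | cons x t ih =>
    intro px linha
    rw [List.foldl_cons, pvInnerStep, ih]
    simp only [Prod.mk.injEq]
    refine ⟨by simp only [List.length_cons]; push_cast; ring, ?_⟩
    rw [List.length_cons, List.range_succ_eq_map]
    simp only [List.map_cons, List.map_map, List.append_assoc, List.singleton_append,
      Nat.cast_zero, mul_zero, add_zero]
    congr 1
    congr 1
    apply List.map_congr_left
    intro j _
    simp only [Function.comp_apply]
    congr 1
    push_cast; ring

theorem pvOuter_fold (r : List Int) :
    ∀ (l : List Int) (py : Int) (m : List (List (List Int))),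
      l.foldl (pvOuterStep r) (0, py, m) =
        (0, py + 20 * l.length,
         m ++ (List.range l.length).map (fun (i : Nat) =>
           (List.range r.length).map
             (fun (j : Nat) => pvInnermost r (20 * (j : Int)) (py + 20 * (i : Int))))) := by
  intro l
  induction l with
  | nil => intro py m; simp
  | cons x t ih =>
    intro py m
    rw [List.foldl_cons, pvOuterStep]
    simp only [pvInner_fold r py r]
    rw [ih]
    simp only [Prod.mk.injEq, List.length_cons, true_and]
    refine ⟨by push_cast; ring, ?_⟩
    rw [List.range_succ_eq_map]
    simp only [List.map_cons, List.map_map, Nat.cast_zero, mul_zero, add_zero, zero_add,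
      List.nil_append, List.append_assoc, List.singleton_append]
    congr 1
    congr 1
    apply List.map_congr_left
    intro i _
    simp only [Function.comp_apply]
    apply List.map_congr_left
    intro j _
    congr 1
    push_cast; ring

-- ===== VERDICT (by name: the statement is the Claim_ definition above) =====
theorem gerar_Matriz_Coord_spec : Claim_equal_gerar_Matriz_Coord := by
  intro tamanho _
  unfold Spec_gerar_Matriz_Coord gerar_Matriz_Coord gerar_Matriz_Coord_alt
  rw [PySem.List.pyRange_one]
  simp only [Int.sub_zero, zero_add]
  rw [pvOuter_fold]
  simp only [List.nil_append, List.length_map, List.length_range, List.map_map]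
  rcases Nat.eq_zero_or_pos tamanho.toNat with h | h
  · simp [h]
  · have hne : (List.range tamanho.toNat).map (fun (k : Nat) => (k : Int)) ≠ [] := by
      intro hc
      have := congrArg List.length hc
      simp at this
      omega
    apply List.ext_getElem
    · simp
    intro i hi _
    simp only [List.getElem_map, List.getElem_range, Function.comp_apply]
    apply List.ext_getElem
    · simp
    intro j hj _
    simp only [List.getElem_map, List.getElem_range, Function.comp_apply, pvInnermost_eq]
    rw [if_neg hne]
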